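-- pv_equiv track=rewrite | github.com/motokimotoki11/MyOpenFace | my-tf-pose-estimation/myproject_camera.py | get_postures
-- ===== SOURCE A (Python) =====
-- def get_postures(point):
--     # ０：鼻、１：心臓、２：右肩、3：右肘、４：右手首、５：左肩、６：左肘、７：左手首、８：右腰、
--     # ９：右膝、10：右足首、11：左腰、12：左膝、13：左足首、14：右目、15：左目、16：右耳、17：左耳
--     # POSITION=['鼻','首の付け根','右肩','右肘','右手首','左肩','左肘','左手首','右腰','右膝',
--     #           '右足首','左腰','左膝','左足首','右目','左目','右耳','左耳']
--
--     main_pos=[[0,0],[0,0],[0,0],[0,0]]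
--
--     for i,j in point.items():
--         if i==0: #鼻
--             main_pos[0]=j
--         elif i==1: #首の付け根
--             main_pos[1]=j
--         elif i==14: #右目
--             main_pos[2]=j
--         elif i==15: #左目
--             main_pos[3]=j
--
--     return main_pos
-- ===== SOURCE B (Python) =====
-- def get_postures(point):
--     # Build the result directly from four keyed lookups instead of scanning all items.
--     return [point.get(0, [0, 0]),
--             point.get(1, [0, 0]),
--             point.get(14, [0, 0]),
--             point.get(15, [0, 0])]
-- ===== Notes on version B (the rewrite author's own statement) =====
-- stated objective: simpler
-- what changed: Replaced the full scan over point.items() with a four-way conditional dispatch and a mutated accumulator by building the result list directly from four dict .get lookups with the same default; no loop and no state.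
import Mathlib
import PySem

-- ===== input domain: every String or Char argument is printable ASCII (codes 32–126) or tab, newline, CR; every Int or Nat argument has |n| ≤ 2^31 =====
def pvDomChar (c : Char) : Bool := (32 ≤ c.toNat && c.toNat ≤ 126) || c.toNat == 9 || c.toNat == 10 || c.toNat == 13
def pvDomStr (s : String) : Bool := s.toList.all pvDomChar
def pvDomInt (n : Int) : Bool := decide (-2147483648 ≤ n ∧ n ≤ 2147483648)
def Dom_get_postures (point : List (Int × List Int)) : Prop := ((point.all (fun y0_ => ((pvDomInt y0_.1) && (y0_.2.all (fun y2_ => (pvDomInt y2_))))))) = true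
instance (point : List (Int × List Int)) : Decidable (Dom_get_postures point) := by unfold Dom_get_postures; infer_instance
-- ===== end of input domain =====

-- B replaces A's scan over all items (four-way branch, mutated accumulator) with four direct
-- keyed lookups with the same default; objective: simpler.

-- ===== PORT A =====
-- loop body of A's 'for i,j in point.items()' as a helper
def get_postures_step (main_pos : List (List Int)) (ij : Int × List Int) : List (List Int) :=
  let i := ij.1
  let j := ij.2
  if i == 0 then main_pos.set 0 j
  else if i == 1 then main_pos.set 1 j
  else if i == 14 then main_pos.set 2 j
  else if i == 15 then main_pos.set 3 j
  else main_pos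

def get_postures (point : List (Int × List Int)) : List (List Int) :=
  point.foldl get_postures_step [[0,0],[0,0],[0,0],[0,0]]

-- ===== PORT B =====
def get_postures_alt (point : List (Int × List Int)) : List (List Int) :=
  let d : PySem.Dict Int (List Int) := PySem.Dict.mk point
  [d.getD 0 [0,0], d.getD 1 [0,0], d.getD 14 [0,0], d.getD 15 [0,0]]

-- ===== PRECONDITION & SPEC =====
-- Pre_ excludes association lists with duplicate keys, which cannot arise from a Python dict
-- (the argument is a dict); on such lists A's last-match loop and B's first-match lookup could differ.
def Pre_get_postures (point : List (Int × List Int)) : Prop := (point.map Prod.fst).Nodup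
instance (point : List (Int × List Int)) : Decidable (Pre_get_postures point) := by unfold Pre_get_postures; infer_instance
def pvWitness_get_postures : (List (Int × List Int)) := [(0, [5, 6]), (15, [7, 8]), (3, [1, 1])]

def Spec_get_postures (point : List (Int × List Int)) (out : List (List Int)) : Prop := out = get_postures_alt point
instance (point : List (Int × List Int)) (out : List (List Int)) : Decidable (Spec_get_postures point out) := by unfold Spec_get_postures; infer_instance

-- ===== CLAIM (what is proved, stated in full; the proofs are below) =====
def Claim_equal_get_postures : Prop := ∀ (point : List (Int × List Int)), Dom_get_postures point → Pre_get_postures point → Spec_get_postures point (get_postures point)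

-- ===== LEMMAS AND PROOFS =====
theorem getD_mk_cons (k x : Int) (v : List Int) (rest : List (Int × List Int)) (d0 : List Int) :
    (PySem.Dict.mk ((k, v) :: rest)).getD x d0 = if k == x then v else (PySem.Dict.mk rest).getD x d0 := by
  simp [PySem.Dict.getD_eq_get?_getD, PySem.Dict.get?_mk_cons]
  split <;> simp

theorem getD_mk_not_mem (x : Int) (rest : List (Int × List Int)) (d0 : List Int)
    (h : x ∉ rest.map Prod.fst) :
    (PySem.Dict.mk rest).getD x d0 = d0 := by
  induction rest with
  | nil => simp [PySem.Dict.getD_eq_get?_getD, PySem.Dict.get?]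
  | cons hd tl ih =>
    simp only [List.map_cons, List.mem_cons] at h
    push Not at h
    rw [getD_mk_cons]
    simp only [beq_iff_eq]
    rw [if_neg (Ne.symm h.1)]
    exact ih h.2

theorem get_postures_loop_eq (pt : List (Int × List Int)) :
    ∀ (a b c d : List Int), (pt.map Prod.fst).Nodup →
    pt.foldl get_postures_step [a, b, c, d] =
      [(PySem.Dict.mk pt).getD 0 a, (PySem.Dict.mk pt).getD 1 b,
       (PySem.Dict.mk pt).getD 14 c, (PySem.Dict.mk pt).getD 15 d] := by
  induction pt with
  | nil =>
    intro a b c d _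
    simp [PySem.Dict.getD_eq_get?_getD, PySem.Dict.get?]
  | cons hd rest ih =>
    intro a b c d hnd
    obtain ⟨i, j⟩ := hd
    simp only [List.map_cons, List.nodup_cons, List.mem_map] at hnd
    obtain ⟨hni, hrest⟩ := hnd
    have hni' : i ∉ rest.map Prod.fst := by
      simp only [List.mem_map]
      rintro ⟨p, hp, hpe⟩
      exact hni ⟨p, hp, hpe⟩
    simp only [List.foldl_cons, get_postures_step, getD_mk_cons, beq_iff_eq, List.set]
    by_cases h0 : i = 0
    · subst h0; norm_num
      rw [ih j b c d hrest, getD_mk_not_mem 0 rest j hni']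
    · by_cases h1 : i = 1
      · subst h1; norm_num
        rw [ih a j c d hrest, getD_mk_not_mem 1 rest j hni']
      · by_cases h14 : i = 14
        · subst h14; norm_num
          rw [ih a b j d hrest, getD_mk_not_mem 14 rest j hni']
        · by_cases h15 : i = 15
          · subst h15; norm_num
            rw [ih a b c j hrest, getD_mk_not_mem 15 rest j hni']
          · simp only [if_neg h0, if_neg h1, if_neg h14, if_neg h15]
            exact ih a b c d hrest

-- ===== VERDICT (by name: the statement is the Claim_ definition above) =====
theorem get_postures_spec : Claim_equal_get_postures := by
  intro point _ hpre
  unfold Spec_get_postures get_postures get_postures_alt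
  exact get_postures_loop_eq point [0,0] [0,0] [0,0] [0,0] hpre
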